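-- pv_equiv track=rewrite | github.com/sansajn/osmut | test/adjacency.py | find_centroids
-- ===== SOURCE A (Python) =====
-- def location_distance(a, b):
-- 	return (b[0] - a[0])**2 + (b[1] - a[1])**2
--
-- def find_centroids(locations, radius):
-- 	# adjacency structure
-- 	tbl = {}  # {idx:[adj1, adj2, ...]}
-- 	for i in range(0, len(locations)):
-- 		tbl[i] = []
--
-- 	for i in range(0, len(locations)):
-- 		loca = locations[i]
-- 		for j in range(0, len(locations)):
-- 			if i == j:
-- 				continue
-- 			locb = locations[j]
-- 			if location_distance(loca, locb) < radius:
-- 				tbl[i].append(j)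
--
-- 	# remove adjacent
-- 	keys = [k for k in tbl.keys()]
-- 	for u in keys:
-- 		if u not in tbl:
-- 			continue
-- 		u_adjs = tbl[u]
-- 		for v in u_adjs:
-- 			if v in tbl:
-- 				v_adjs = tbl[v]
-- 				if len(u_adjs) >= len(v_adjs):
-- 					del tbl[v]
--
-- 	return tbl
-- ===== SOURCE B (Python) =====
-- def find_centroids(locations, radius):
--     n = len(locations)
--     adj = [[] for _ in range(n)]
--     if radius > 0:
--         # cell size: smallest s >= 1 with s*s >= radius, so points closer
--         # than sqrt(radius) lie in the same or an adjacent grid cell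
--         s = 1
--         while s * s < radius:
--             s += 1
--         grid = {}
--         for i in range(n):
--             x, y = locations[i]
--             grid.setdefault((x // s, y // s), []).append(i)
--         for i in range(n):
--             x, y = locations[i]
--             cx, cy = x // s, y // s
--             cand = []
--             for dx in (-1, 0, 1):
--                 for dy in (-1, 0, 1):
--                     cand.extend(grid.get((cx + dx, cy + dy), []))
--             cand.sort()
--             ai = adj[i]
--             for j in cand:
--                 if j != i:
--                     p = locations[j]
--                     if (p[0] - x) ** 2 + (p[1] - y) ** 2 < radius:
--                         ai.append(j)
--     alive = [True] * n
--     for u in range(n):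
--         if alive[u]:
--             au = adj[u]
--             for v in au:
--                 if alive[v] and len(au) >= len(adj[v]):
--                     alive[v] = False
--     return {i: adj[i] for i in range(n) if alive[i]}
-- ===== Notes on version B (the rewrite author's own statement) =====
-- stated objective: alternative
-- what changed: B replaces A's all-pairs nested adjacency scan by uniform spatial grid bucketing (cell size ceil(sqrt(radius)), candidates gathered from the 3x3 neighbouring cells and sorted to keep index order) and replaces A's dict-deletion pruning pass by a boolean alive-array pass, returning the same insertion-ordered dict.
import Mathlib
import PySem

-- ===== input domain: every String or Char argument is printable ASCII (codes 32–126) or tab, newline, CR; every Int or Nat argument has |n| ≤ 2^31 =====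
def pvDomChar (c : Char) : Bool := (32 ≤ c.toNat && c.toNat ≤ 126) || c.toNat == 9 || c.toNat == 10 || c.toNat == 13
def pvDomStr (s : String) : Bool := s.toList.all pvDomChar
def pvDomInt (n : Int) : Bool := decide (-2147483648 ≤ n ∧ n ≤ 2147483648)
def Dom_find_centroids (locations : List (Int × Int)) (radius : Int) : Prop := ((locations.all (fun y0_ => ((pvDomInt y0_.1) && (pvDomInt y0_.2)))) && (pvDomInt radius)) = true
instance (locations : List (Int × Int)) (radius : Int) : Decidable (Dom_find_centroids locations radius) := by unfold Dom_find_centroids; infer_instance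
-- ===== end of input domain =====

-- B replaces A's all-pairs nested adjacency scan by spatial grid bucketing (3x3
-- neighbouring cells, candidates sorted to keep index order) and A's dict-deletion
-- pruning by a boolean alive-array pass: a structurally different exact algorithm.
-- ===== PORT A =====
def location_distance (a b : Int × Int) : Int :=
  (b.1 - a.1) ^ 2 + (b.2 - a.2) ^ 2

def find_centroids (locations : List (Int × Int)) (radius : Int) : List (Int × List Int) :=
  let n : Int := PySem.List.len locations
  -- adjacency structure: tbl = {} ; for i in range(len): tbl[i] = []
  let tbl : PySem.Dict Int (List Int) :=
    (PySem.List.pyRange 0 n 1).foldl (fun d i => d.insert i []) PySem.Dict.empty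
  -- for i … for j …: if dist < radius: tbl[i].append(j)
  let tbl :=
    (PySem.List.pyRange 0 n 1).foldl (fun d i =>
      let loca := PySem.List.pyGetD locations i (0, 0)
      (PySem.List.pyRange 0 n 1).foldl (fun d j =>
        if i = j then d
        else
          let locb := PySem.List.pyGetD locations j (0, 0)
          if location_distance loca locb < radius then
            d.modify i [] (fun l => l ++ [j])
          else d) d) tbl
  -- remove adjacent
  let keys := tbl.keys
  let tbl :=
    keys.foldl (fun d u =>
      if d.contains u = false then d
      else
        let u_adjs := d.getD u []
        u_adjs.foldl (fun d v =>
          if d.contains v then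
            let v_adjs := d.getD v []
            if v_adjs.length ≤ u_adjs.length then d.erase v else d
          else d) d) tbl
  tbl.items

-- ===== PORT B =====
-- s = 1; while s * s < radius: s += 1     (smallest s ≥ 1 with s*s ≥ radius;
-- fuel only makes the loop structurally total: radius.toNat steps always suffice)
def pvCellLoop (radius s : Int) : Nat → Int
  | 0 => s
  | fuel + 1 => if s * s < radius then pvCellLoop radius (s + 1) fuel else s

def find_centroids_alt (locations : List (Int × Int)) (radius : Int) : List (Int × List Int) :=
  let n : Int := PySem.List.len locations
  let adj : List (List Int) := (PySem.List.pyRange 0 n 1).map (fun _ => ([] : List Int))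
  let adj :=
    if 0 < radius then
      let s := pvCellLoop radius 1 radius.toNat
      -- grid = {} ; grid.setdefault((x//s, y//s), []).append(i)
      let grid : PySem.Dict (Int × Int) (List Int) :=
        (PySem.List.pyRange 0 n 1).foldl (fun g i =>
          (g.setdefault (PySem.Int.floordiv (PySem.List.pyGetD locations i (0, 0)).1 s, PySem.Int.floordiv (PySem.List.pyGetD locations i (0, 0)).2 s) []).modify
            (PySem.Int.floordiv (PySem.List.pyGetD locations i (0, 0)).1 s, PySem.Int.floordiv (PySem.List.pyGetD locations i (0, 0)).2 s) [] (fun l => l ++ [i])) PySem.Dict.empty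
      -- cand = buckets of the 3x3 neighbouring cells, sorted; then filter by distance
      (PySem.List.pyRange 0 n 1).foldl
        (fun adj i =>
        PySem.List.pySetD adj i
          ((PySem.List.sorted
              (([-1, 0, 1] : List Int).foldl (fun cand dx =>
                ([-1, 0, 1] : List Int).foldl (fun cand dy =>
                  cand ++ (grid).getD
                    (PySem.Int.floordiv (PySem.List.pyGetD locations i (0, 0)).1 s + dx,
                     PySem.Int.floordiv (PySem.List.pyGetD locations i (0, 0)).2 s + dy) []) cand) [])
              id).foldl
            (fun ai j =>
              if j ≠ i then
                if ((PySem.List.pyGetD locations j (0, 0)).1 - (PySem.List.pyGetD locations i (0, 0)).1) ^ 2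
                    + ((PySem.List.pyGetD locations j (0, 0)).2 - (PySem.List.pyGetD locations i (0, 0)).2) ^ 2 < radius
                then ai ++ [j] else ai
              else ai)
            (PySem.List.pyGetD adj i []))) adj
    else adj
  -- alive = [True]*n ; prune dominated neighbours
  let alive : List Bool := (PySem.List.pyRange 0 n 1).map (fun _ => true)
  let alive :=
    (PySem.List.pyRange 0 n 1).foldl (fun alive u =>
      if PySem.List.pyGetD alive u false then
        (PySem.List.pyGetD adj u []).foldl (fun alive v =>
          if PySem.List.pyGetD alive v false
             && decide ((PySem.List.pyGetD adj v []).length ≤ (PySem.List.pyGetD adj u []).length) then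
            PySem.List.pySetD alive v false
          else alive) alive
      else alive) alive
  -- return {i: adj[i] for i in range(n) if alive[i]}
  (((PySem.List.pyRange 0 n 1).filter (fun i => PySem.List.pyGetD alive i false)).foldl
    (fun d i => d.insert i (PySem.List.pyGetD adj i [])) PySem.Dict.empty).items

-- ===== PRECONDITION & SPEC =====
def Spec_find_centroids (locations : List (Int × Int)) (radius : Int) (out : List (Int × List Int)) : Prop := out = find_centroids_alt locations radius
instance (locations : List (Int × Int)) (radius : Int) (out : List (Int × List Int)) : Decidable (Spec_find_centroids locations radius out) := by unfold Spec_find_centroids; infer_instance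

-- ===== CLAIM (what is proved, stated in full; the proofs are below) =====
def Claim_equal_find_centroids : Prop := ∀ (locations : List (Int × Int)) (radius : Int), Dom_find_centroids locations radius → Spec_find_centroids locations radius (find_centroids locations radius)

-- ===== LEMMAS AND PROOFS =====

-- the brute-force adjacency list of node i (what both phases compute)
def pvPred (locs : List (Int × Int)) (radius i j : Int) : Bool :=
  decide (j ≠ i) && decide (location_distance (PySem.List.pyGetD locs i (0, 0)) (PySem.List.pyGetD locs j (0, 0)) < radius)

def adjSpec (locs : List (Int × Int)) (radius i : Int) : List Int :=
  (PySem.List.pyRange 0 (locs.length : Int) 1).filter (pvPred locs radius i)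

def aliveF (al : List Bool) (k : Int) : Bool := PySem.List.pyGetD al k false

-- the dict state of A's removal phase, as a function of the alive mask
def repD (locs : List (Int × Int)) (radius : Int) (al : List Bool) : PySem.Dict Int (List Int) :=
  ⟨((PySem.List.pyRange 0 (locs.length : Int) 1).filter (fun k => aliveF al k)).map
      (fun k => (k, adjSpec locs radius k))⟩

-- abstract pruning step (what both removal loops do to the alive mask at key u)
def pruneStepB (locs : List (Int × Int)) (radius : Int) (al : List Bool) (u : Int) : List Bool :=
  if aliveF al u then
    (adjSpec locs radius u).foldl
      (fun al v =>
        if aliveF al v && decide ((adjSpec locs radius v).length ≤ (adjSpec locs radius u).length) then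
          PySem.List.pySetD al v false
        else al) al
  else al

def aliveInit (locs : List (Int × Int)) : List Bool :=
  (PySem.List.pyRange 0 (locs.length : Int) 1).map (fun _ => true)

def pruneB (locs : List (Int × Int)) (radius : Int) : List Bool :=
  (PySem.List.pyRange 0 (locs.length : Int) 1).foldl (pruneStepB locs radius) (aliveInit locs)

-- ---------- generic facts ----------

lemma perm_filter_or (l : List Int) (p q : Int → Bool) (hdis : ∀ x, ¬(p x = true ∧ q x = true)) :
    (l.filter p ++ l.filter q).Perm (l.filter (fun x => p x || q x)) := by
  induction l with
  | nil => simp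
  | cons x l ih =>
    cases hp : p x with
    | true =>
      have hq : q x = false := by
        cases hq : q x
        · rfl
        · exact absurd ⟨hp, hq⟩ (hdis x)
      simpa [List.filter_cons, hp, hq] using ih.cons x
    | false =>
      cases hq : q x with
      | true =>
        simp only [List.filter_cons, hp, hq, Bool.false_or]
        exact (List.perm_middle).trans (ih.cons x)
      | false => simpa [List.filter_cons, hp, hq] using ih

lemma flatMap_filter_perm (l : List Int) (key : Int → Int × Int) (cs : List (Int × Int)) (hnd : cs.Nodup) :
    (cs.flatMap (fun c => l.filter (fun i => key i == c))).Perm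
      (l.filter (fun i => decide (key i ∈ cs))) := by
  induction cs with
  | nil => simp
  | cons c cs ih =>
    simp only [List.flatMap_cons]
    have ih' := ih (List.Nodup.of_cons hnd)
    have hdis : ∀ x, ¬((key x == c) = true ∧ decide (key x ∈ cs) = true) := by
      intro x ⟨h1, h2⟩
      have : key x = c := by simpa using h1
      have : c ∈ cs := by simpa [this] using h2
      exact (List.nodup_cons.mp hnd).1 this
    have step := perm_filter_or l (fun i => key i == c) (fun i => decide (key i ∈ cs)) hdis
    have : (l.filter (fun i => key i == c) ++ l.filter (fun i => decide (key i ∈ cs))).Perm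
        (l.filter (fun i => decide (key i ∈ c :: cs))) := by
      have he : (fun i => (key i == c) || decide (key i ∈ cs)) = (fun i => decide (key i ∈ c :: cs)) := by
        funext i
        simp [List.mem_cons, Bool.beq_eq_decide_eq, eq_comm]
      rw [← he]
      exact step
    exact (((ih').append_left (l.filter (fun i => key i == c)))).trans this

-- ---------- A: adjacency phase ----------

lemma init_dict_items (n : Int) :
    ((PySem.List.pyRange 0 n 1).foldl (fun d i => d.insert i ([] : List Int)) PySem.Dict.empty).items
      = (PySem.List.pyRange 0 n 1).map (fun i => (i, ([] : List Int))) := by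
  rw [PySem.Dict.items_foldl_insert_fresh (k := fun i => i) (v := fun _ => [])]
  · simp [PySem.Dict.empty]
  · intro a _; simp
  · simpa using PySem.List.nodup_pyRange_one 0 n

lemma innerA_eq (locs : List (Int × Int)) (radius i : Int) (d : PySem.Dict Int (List Int)) :
    (PySem.List.pyRange 0 (locs.length : Int) 1).foldl (fun d j =>
        if i = j then d
        else
          if location_distance (PySem.List.pyGetD locs i (0, 0)) (PySem.List.pyGetD locs j (0, 0)) < radius then
            d.modify i [] (fun l => l ++ [j])
          else d) d
      = (adjSpec locs radius i).foldl (fun d j => d.modify i [] (fun l => l ++ [j])) d := by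
  unfold adjSpec
  have h2 := PySem.List.foldl_if_eq_foldl_filter (pvPred locs radius i)
      (fun (d : PySem.Dict Int (List Int)) j => d.modify i [] (fun l => l ++ [j]))
      (PySem.List.pyRange 0 (locs.length : Int) 1) d
  rw [← h2]
  apply PySem.List.foldl_congr_mem
  intro acc j _
  by_cases hij : i = j
  · simp [hij, pvPred]
  · by_cases hd : location_distance (PySem.List.pyGetD locs i (0, 0)) (PySem.List.pyGetD locs j (0, 0)) < radius
    · simp [hij, hd, pvPred, Ne.symm hij]
    · simp [hij, hd, pvPred]

lemma modifold_getD (lst : List Int) (i : Int) (d : PySem.Dict Int (List Int)) (c : Int) :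
    ((lst.foldl (fun d j => d.modify i [] (fun l => l ++ [j])) d)).getD c []
      = if c = i then d.getD i [] ++ lst else d.getD c [] := by
  induction lst generalizing d with
  | nil => split <;> simp_all
  | cons j lst ih =>
    simp only [List.foldl_cons]
    rw [ih]
    by_cases hc : c = i
    · subst hc
      simp [PySem.Dict.getD_modify_self]
    · simp [hc, PySem.Dict.getD_modify_of_ne _ _ _ hc]

lemma modifold_keys (lst : List Int) (i : Int) (d : PySem.Dict Int (List Int)) (hi : i ∈ d.keys) :
    ((lst.foldl (fun d j => d.modify i [] (fun l => l ++ [j])) d)).keys = d.keys := by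
  induction lst generalizing d with
  | nil => rfl
  | cons j lst ih =>
    simp only [List.foldl_cons]
    rw [ih, PySem.Dict.keys_modify, PySem.Dict.keys_insert_of_contains]
    rw [PySem.Dict.contains_iff_mem_keys]
    exact hi
    rw [PySem.Dict.keys_modify, PySem.Dict.keys_insert_of_contains]
    · exact hi
    · rw [PySem.Dict.contains_iff_mem_keys]; exact hi

lemma getD_mk_const_nil (l : List Int) (c : Int) :
    (PySem.Dict.mk (l.map (fun i => (i, ([] : List Int))))).getD c [] = [] := by
  induction l with
  | nil => simp [PySem.Dict.getD_eq_get?_getD, PySem.Dict.get?]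
  | cons x l ih =>
    rw [PySem.Dict.getD_eq_get?_getD, List.map_cons, PySem.Dict.get?_mk_cons]
    split
    · rfl
    · rw [← PySem.Dict.getD_eq_get?_getD]; exact ih

lemma phase1_char (locs : List (Int × Int)) (radius : Int) (m : Nat) (hm : m ≤ locs.length) :
    ((PySem.List.pyRange 0 (m : Int) 1).foldl (fun d i =>
        let loca := PySem.List.pyGetD locs i (0, 0)
        (PySem.List.pyRange 0 (locs.length : Int) 1).foldl (fun d j =>
          if i = j then d
          else
            let locb := PySem.List.pyGetD locs j (0, 0)
            if location_distance loca locb < radius then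
              d.modify i [] (fun l => l ++ [j])
            else d) d)
        ((PySem.List.pyRange 0 (locs.length : Int) 1).foldl (fun d i => d.insert i ([] : List Int)) PySem.Dict.empty)).keys
        = PySem.List.pyRange 0 (locs.length : Int) 1
    ∧
    ∀ c, ((PySem.List.pyRange 0 (m : Int) 1).foldl (fun d i =>
        let loca := PySem.List.pyGetD locs i (0, 0)
        (PySem.List.pyRange 0 (locs.length : Int) 1).foldl (fun d j =>
          if i = j then d
          else
            let locb := PySem.List.pyGetD locs j (0, 0)
            if location_distance loca locb < radius then
              d.modify i [] (fun l => l ++ [j])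
            else d) d)
        ((PySem.List.pyRange 0 (locs.length : Int) 1).foldl (fun d i => d.insert i ([] : List Int)) PySem.Dict.empty)).getD c []
        = if 0 ≤ c ∧ c < (m : Int) then adjSpec locs radius c else [] := by
  induction m with
  | zero =>
    rw [show ((0 : Nat) : Int) = 0 from rfl, PySem.List.pyRange_one_eq_nil (le_refl 0)]
    simp only [List.foldl_nil]
    have hd0 : ((PySem.List.pyRange 0 (locs.length : Int) 1).foldl
        (fun d i => d.insert i ([] : List Int)) PySem.Dict.empty)
        = PySem.Dict.mk ((PySem.List.pyRange 0 (locs.length : Int) 1).map (fun i => (i, []))) :=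
      PySem.Dict.ext (init_dict_items _)
    constructor
    · rw [hd0]
      simp [PySem.Dict.keys, List.map_map, Function.comp_def]
    · intro c
      rw [hd0, getD_mk_const_nil]
      have : ¬(0 ≤ c ∧ c < (0 : Int)) := by omega
      simp [this]
  | succ m ih =>
    obtain ⟨ihk, ihg⟩ := ih (by omega)
    have hrange : PySem.List.pyRange 0 ((m + 1 : Nat) : Int) 1
        = PySem.List.pyRange 0 (m : Int) 1 ++ [(m : Int)] := by
      push_cast
      exact PySem.List.pyRange_one_succ_right (a := 0) (b := (m : Int)) (Int.natCast_nonneg m)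
    rw [hrange, List.foldl_append, List.foldl_cons, List.foldl_nil]
    simp only []
    rw [innerA_eq]
    have hmem : (m : Int) ∈ (List.foldl (fun d i =>
        let loca := PySem.List.pyGetD locs i (0, 0)
        (PySem.List.pyRange 0 (locs.length : Int) 1).foldl (fun d j =>
          if i = j then d
          else
            let locb := PySem.List.pyGetD locs j (0, 0)
            if location_distance loca locb < radius then
              d.modify i [] (fun l => l ++ [j])
            else d) d)
        ((PySem.List.pyRange 0 (locs.length : Int) 1).foldl (fun d i => d.insert i ([] : List Int)) PySem.Dict.empty)
        (PySem.List.pyRange 0 (m : Int) 1)).keys := by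
      rw [ihk, PySem.List.mem_pyRange_one]
      refine ⟨Int.natCast_nonneg m, ?_⟩
      exact_mod_cast (by omega : m < locs.length)
    constructor
    · rw [modifold_keys _ _ _ hmem]; exact ihk
    · intro c
      simp only [] at ihg
      rw [modifold_getD]
      simp only [ihg]
      by_cases hc : c = (m : Int)
      · subst hc
        rw [if_pos rfl, if_neg (by omega), if_pos ⟨Int.natCast_nonneg m, by push_cast; omega⟩]
        simp
      · rw [if_neg hc]
        by_cases h2 : 0 ≤ c ∧ c < (m : Int)
        · rw [if_pos h2, if_pos (by push_cast at h2 ⊢; omega)]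
        · rw [if_neg h2, if_neg (by push_cast at h2 ⊢; omega)]

lemma aliveInit_get (locs : List (Int × Int)) (k : Int) (h0 : 0 ≤ k) (hk : k < (locs.length : Int)) :
    aliveF (aliveInit locs) k = true := by
  unfold aliveF aliveInit
  rw [PySem.List.pyGetD_map_pyRange_of_nonneg _ _ _ _ h0 hk]

lemma phase1_eq_repD (locs : List (Int × Int)) (radius : Int) :
    ((PySem.List.pyRange 0 (locs.length : Int) 1).foldl (fun d i =>
        let loca := PySem.List.pyGetD locs i (0, 0)
        (PySem.List.pyRange 0 (locs.length : Int) 1).foldl (fun d j =>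
          if i = j then d
          else
            let locb := PySem.List.pyGetD locs j (0, 0)
            if location_distance loca locb < radius then
              d.modify i [] (fun l => l ++ [j])
            else d) d)
        ((PySem.List.pyRange 0 (locs.length : Int) 1).foldl (fun d i => d.insert i ([] : List Int)) PySem.Dict.empty))
      = repD locs radius (aliveInit locs) := by
  obtain ⟨hk, hg⟩ := phase1_char locs radius locs.length (le_refl _)
  apply PySem.Dict.ext
  rw [PySem.Dict.items_eq_map_keys _ (by rw [hk]; exact PySem.List.nodup_pyRange_one 0 _) []]
  rw [hk]
  show _ = ((PySem.List.pyRange 0 (locs.length : Int) 1).filter (fun k => aliveF (aliveInit locs) k)).map _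
  rw [List.filter_eq_self.mpr]
  · apply List.map_congr_left
    intro k hkmem
    obtain ⟨h0, hn⟩ := (PySem.List.mem_pyRange_one).mp hkmem
    rw [hg k]
    simp [h0, hn]
  · intro k hkmem
    obtain ⟨h0, hn⟩ := (PySem.List.mem_pyRange_one).mp hkmem
    exact aliveInit_get locs k h0 hn

-- ---------- the repD dictionary ----------

lemma repD_keys (locs : List (Int × Int)) (radius : Int) (al : List Bool) :
    (repD locs radius al).keys = (PySem.List.pyRange 0 (locs.length : Int) 1).filter (fun k => aliveF al k) := by
  simp [repD, PySem.Dict.keys, List.map_map, Function.comp_def]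

lemma repD_contains (locs : List (Int × Int)) (radius : Int) (al : List Bool) (k : Int)
    (h0 : 0 ≤ k) (hk : k < (locs.length : Int)) :
    (repD locs radius al).contains k = aliveF al k := by
  rw [PySem.Dict.contains_eq_decide_mem_keys, repD_keys]
  cases ha : aliveF al k <;>
    simp [List.mem_filter, PySem.List.mem_pyRange_one, h0, hk, ha]

lemma repD_getD (locs : List (Int × Int)) (radius : Int) (al : List Bool) (k : Int)
    (h0 : 0 ≤ k) (hk : k < (locs.length : Int)) (ha : aliveF al k = true) :
    (repD locs radius al).getD k [] = adjSpec locs radius k := by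
  apply PySem.Dict.getD_of_mem_items
  · show (k, adjSpec locs radius k) ∈ List.map _ _
    exact List.mem_map_of_mem
      (List.mem_filter.mpr ⟨PySem.List.mem_pyRange_one.mpr ⟨h0, hk⟩, ha⟩)
  · rw [repD_keys]
    exact (PySem.List.nodup_pyRange_one 0 _).filter _

lemma repD_erase (locs : List (Int × Int)) (radius : Int) (al : List Bool) (v : Int)
    (h0 : 0 ≤ v) (hv : v < (locs.length : Int)) (hlen : al.length = locs.length) :
    (repD locs radius al).erase v = repD locs radius (PySem.List.pySetD al v false) := by
  unfold repD PySem.Dict.erase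
  simp only []
  congr 1
  rw [List.filter_map, List.filter_filter]
  apply congrArg
  apply List.filter_congr
  intro k hkmem
  obtain ⟨h0k, hnk⟩ := (PySem.List.mem_pyRange_one).mp hkmem
  have hv2 : ((v.toNat : Nat) : Int) = v := by omega
  have hk2 : ((k.toNat : Nat) : Int) = k := by omega
  unfold aliveF
  rw [← hv2, ← hk2, PySem.List.pyGetD_pySetD_natCast al v.toNat k.toNat false false (by omega)]
  simp only [Function.comp]
  by_cases hkv : k.toNat = v.toNat
  · rw [if_pos hkv, hk2, hv2]
    have : k = v := by omega
    simp [this]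
  · rw [if_neg hkv, hk2, hv2]
    have : ¬(k = v) := by omega
    simp [this]

-- ---------- pruning correspondence ----------

lemma prune_inner (locs : List (Int × Int)) (radius : Int) (U : List Int) (lst : List Int)
    (hlst : ∀ v ∈ lst, 0 ≤ v ∧ v < (locs.length : Int)) (al : List Bool) (hal : al.length = locs.length) :
    lst.foldl (fun d v =>
        if d.contains v then
          let v_adjs := d.getD v []
          if v_adjs.length ≤ U.length then d.erase v else d
        else d) (repD locs radius al)
      = repD locs radius (lst.foldl (fun al v =>
          if aliveF al v && decide ((adjSpec locs radius v).length ≤ U.length) then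
            PySem.List.pySetD al v false
          else al) al) := by
  induction lst generalizing al with
  | nil => rfl
  | cons v lst ih =>
    obtain ⟨h0v, hvn⟩ := hlst v List.mem_cons_self
    simp only [List.foldl_cons]
    rw [repD_contains locs radius al v h0v hvn]
    cases ha : aliveF al v with
    | false =>
      simp only [Bool.false_and, Bool.false_eq_true, if_false]
      exact ih (fun w hw => hlst w (List.mem_cons_of_mem v hw)) al hal
    | true =>
      rw [if_pos rfl]
      rw [repD_getD locs radius al v h0v hvn ha]
      by_cases hle : (adjSpec locs radius v).length ≤ U.length
      · rw [if_pos hle, repD_erase locs radius al v h0v hvn hal]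
        have : (true && decide ((adjSpec locs radius v).length ≤ U.length)) = true := by
          simp [hle]
        rw [this, if_pos rfl]
        refine ih (fun w hw => hlst w (List.mem_cons_of_mem v hw)) _ ?_
        have hv2 : ((v.toNat : Nat) : Int) = v := by omega
        rw [← hv2, PySem.List.pySetD_natCast]
        simp [hal]
      · rw [if_neg hle]
        have : (true && decide ((adjSpec locs radius v).length ≤ U.length)) = false := by
          simp [hle]
        rw [this]
        simp only [Bool.false_eq_true, if_false]
        exact ih (fun w hw => hlst w (List.mem_cons_of_mem v hw)) al hal

lemma pruneFold_length (locs : List (Int × Int)) (radius : Int) (U : List Int) (lst : List Int) (al : List Bool) :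
    (lst.foldl (fun al v =>
        if aliveF al v && decide ((adjSpec locs radius v).length ≤ U.length) then
          PySem.List.pySetD al v false
        else al) al).length = al.length := by
  induction lst generalizing al with
  | nil => rfl
  | cons v lst ih =>
    simp only [List.foldl_cons]
    rw [ih]
    split
    · exact PySem.List.length_pySetD al v false
    · rfl

lemma adjSpec_mem (locs : List (Int × Int)) (radius u v : Int) (hv : v ∈ adjSpec locs radius u) :
    0 ≤ v ∧ v < (locs.length : Int) := by
  unfold adjSpec at hv
  exact PySem.List.mem_pyRange_one.mp (List.mem_of_mem_filter hv)

lemma pruneStepB_length (locs : List (Int × Int)) (radius : Int) (al : List Bool) (u : Int) :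
    (pruneStepB locs radius al u).length = al.length := by
  unfold pruneStepB
  split
  · exact pruneFold_length locs radius (adjSpec locs radius u) (adjSpec locs radius u) al
  · rfl

lemma prune_outer (locs : List (Int × Int)) (radius : Int) (ks : List Int)
    (hks : ∀ u ∈ ks, 0 ≤ u ∧ u < (locs.length : Int)) (al : List Bool) (hal : al.length = locs.length) :
    ks.foldl (fun d u =>
        if d.contains u = false then d
        else
          let u_adjs := d.getD u []
          u_adjs.foldl (fun d v =>
            if d.contains v then
              let v_adjs := d.getD v []
              if v_adjs.length ≤ u_adjs.length then d.erase v else d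
            else d) d) (repD locs radius al)
      = repD locs radius (ks.foldl (pruneStepB locs radius) al) := by
  induction ks generalizing al with
  | nil => rfl
  | cons u ks ih =>
    obtain ⟨h0u, hun⟩ := hks u List.mem_cons_self
    simp only [List.foldl_cons]
    rw [repD_contains locs radius al u h0u hun]
    cases ha : aliveF al u with
    | false =>
      have hstep : pruneStepB locs radius al u = al := by
        unfold pruneStepB; rw [ha]; simp
      rw [hstep, if_pos rfl]
      exact ih (fun w hw => hks w (List.mem_cons_of_mem u hw)) al hal
    | true =>
      rw [if_neg (by decide)]
      rw [repD_getD locs radius al u h0u hun ha]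
      rw [prune_inner locs radius (adjSpec locs radius u) (adjSpec locs radius u)
            (fun v hv => adjSpec_mem locs radius u v hv) al hal]
      have hstep : pruneStepB locs radius al u = (adjSpec locs radius u).foldl
          (fun al v =>
            if aliveF al v && decide ((adjSpec locs radius v).length ≤ (adjSpec locs radius u).length) then
              PySem.List.pySetD al v false
            else al) al := by
        unfold pruneStepB; rw [ha]; simp
      rw [← hstep]
      refine ih (fun w hw => hks w (List.mem_cons_of_mem u hw)) _ ?_
      rw [pruneStepB_length]
      exact hal

-- ---------- A's main characterisation ----------

lemma mainA (locs : List (Int × Int)) (radius : Int) :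
    find_centroids locs radius = (repD locs radius (pruneB locs radius)).items := by
  simp only [find_centroids, PySem.List.len_eq]
  have h1 := phase1_eq_repD locs radius
  simp only [] at h1
  rw [h1, repD_keys]
  rw [List.filter_eq_self.mpr (fun k hk =>
    aliveInit_get locs k (PySem.List.mem_pyRange_one.mp hk).1 (PySem.List.mem_pyRange_one.mp hk).2)]
  rw [prune_outer locs radius _ (fun u hu => PySem.List.mem_pyRange_one.mp hu) (aliveInit locs)
      (by simp [aliveInit, PySem.List.length_pyRange_one])]
  rfl

-- ---------- B: cell size ----------

lemma pvCellLoop_spec (radius : Int) : ∀ (fuel : Nat) (s : Int), 1 ≤ s → radius ≤ s + (fuel : Int) →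
    1 ≤ pvCellLoop radius s fuel ∧ radius ≤ pvCellLoop radius s fuel * pvCellLoop radius s fuel := by
  intro fuel
  induction fuel with
  | zero =>
    intro s hs hr
    refine ⟨hs, ?_⟩
    have h1 : s * 1 ≤ s * s := mul_le_mul_of_nonneg_left hs (by omega)
    simp only [pvCellLoop]
    omega
  | succ fuel ih =>
    intro s hs hr
    rw [pvCellLoop]
    by_cases h : s * s < radius
    · rw [if_pos h]
      exact ih (s + 1) (by omega) (by push_cast at hr ⊢; omega)
    · rw [if_neg h]
      exact ⟨hs, by omega⟩

-- ---------- B: grid ----------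

lemma setdefault_modify (g : PySem.Dict (Int × Int) (List Int)) (c : Int × Int) (f : List Int → List Int) :
    (g.setdefault c []).modify c [] f = g.modify c [] f := by
  by_cases h : g.contains c = true
  · rw [PySem.Dict.setdefault_of_contains _ _ h]
  · have hf : g.contains c = false := by simpa using h
    rw [PySem.Dict.setdefault_of_not_contains _ _ hf]
    unfold PySem.Dict.modify
    rw [PySem.Dict.getD_insert_self, PySem.Dict.insert_insert_self,
        PySem.Dict.getD_of_not_contains _ _ hf]

lemma grid_getD (locs : List (Int × Int)) (s : Int) (c : Int × Int) :
    ((PySem.List.pyRange 0 (locs.length : Int) 1).foldl (fun g i =>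
          (g.setdefault (PySem.Int.floordiv (PySem.List.pyGetD locs i (0, 0)).1 s, PySem.Int.floordiv (PySem.List.pyGetD locs i (0, 0)).2 s) []).modify
            (PySem.Int.floordiv (PySem.List.pyGetD locs i (0, 0)).1 s, PySem.Int.floordiv (PySem.List.pyGetD locs i (0, 0)).2 s) [] (fun l => l ++ [i])) PySem.Dict.empty).getD c []
      = (PySem.List.pyRange 0 (locs.length : Int) 1).filter (fun i =>
          ((PySem.Int.floordiv (PySem.List.pyGetD locs i (0, 0)).1 s,
            PySem.Int.floordiv (PySem.List.pyGetD locs i (0, 0)).2 s) : Int × Int) == c) := by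
  have hcongr : ∀ (g : PySem.Dict (Int × Int) (List Int)) (i : Int),
      i ∈ PySem.List.pyRange 0 (locs.length : Int) 1 →
      (g.setdefault ((PySem.Int.floordiv (PySem.List.pyGetD locs i (0, 0)).1 s,
          PySem.Int.floordiv (PySem.List.pyGetD locs i (0, 0)).2 s) : Int × Int) []).modify
        ((PySem.Int.floordiv (PySem.List.pyGetD locs i (0, 0)).1 s,
          PySem.Int.floordiv (PySem.List.pyGetD locs i (0, 0)).2 s) : Int × Int) [] (fun l => l ++ [i])
      = g.modify ((PySem.Int.floordiv (PySem.List.pyGetD locs i (0, 0)).1 s,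
                   PySem.Int.floordiv (PySem.List.pyGetD locs i (0, 0)).2 s)) [] (fun l => l ++ [i]) := by
    intro g i _
    exact setdefault_modify g _ _
  rw [PySem.List.foldl_congr_mem _ _ _ _ hcongr]
  have hmapfold : (PySem.List.pyRange 0 (locs.length : Int) 1).foldl
      (fun g i => g.modify ((PySem.Int.floordiv (PySem.List.pyGetD locs i (0, 0)).1 s,
                   PySem.Int.floordiv (PySem.List.pyGetD locs i (0, 0)).2 s)) [] (fun l => l ++ [i]))
      PySem.Dict.empty
      = ((PySem.List.pyRange 0 (locs.length : Int) 1).map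
          (fun i => (((PySem.Int.floordiv (PySem.List.pyGetD locs i (0, 0)).1 s,
                       PySem.Int.floordiv (PySem.List.pyGetD locs i (0, 0)).2 s) : Int × Int), i))).foldl
          (fun d p => d.modify p.1 [] (fun l => l ++ [p.2])) PySem.Dict.empty := by
    rw [List.foldl_map]
  rw [hmapfold, PySem.Dict.getD_foldl_modify_append, PySem.Dict.getD_empty, List.nil_append,
      List.filter_map, List.map_map]
  simp [Function.comp_def]

-- ---------- B: geometry ----------

lemma floordiv_near (s a b : Int) (hs : 1 ≤ s) (hab : a - s < b) (hab' : b < a + s) :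
    PySem.Int.floordiv a s - 1 ≤ PySem.Int.floordiv b s ∧
      PySem.Int.floordiv b s ≤ PySem.Int.floordiv a s + 1 := by
  obtain ⟨hq1, hq2⟩ := (PySem.Int.floordiv_eq_iff_of_pos (a := a) (b := s)
    (q := PySem.Int.floordiv a s) (by omega)).mp rfl
  constructor
  · rw [PySem.Int.le_floordiv_iff_mul_le (by omega)]
    nlinarith
  · have h2 : PySem.Int.floordiv b s < PySem.Int.floordiv a s + 2 := by
      rw [PySem.Int.floordiv_lt_iff_lt_mul (by omega)]
      nlinarith
    omega

lemma sq_lt_of_sum_sq_lt (dx dy r s : Int) (h : dx ^ 2 + dy ^ 2 < r) (hrs : r ≤ s * s) (hs : 1 ≤ s) :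
    -s < dx ∧ dx < s ∧ -s < dy ∧ dy < s := by
  have h1 : dx ^ 2 < s * s := by nlinarith [sq_nonneg dy]
  have h2 : dy ^ 2 < s * s := by nlinarith [sq_nonneg dx]
  refine ⟨?_, ?_, ?_, ?_⟩
  · nlinarith [sq_nonneg (dx + s)]
  · nlinarith [sq_nonneg (dx - s)]
  · nlinarith [sq_nonneg (dy + s)]
  · nlinarith [sq_nonneg (dy - s)]

-- ---------- B: per-node candidate list ----------

set_option maxHeartbeats 2000000 in
lemma ai_char (locs : List (Int × Int)) (radius : Int) (i : Int)
    (s : Int) (hs : 1 ≤ s) (hrs : radius ≤ s * s)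
    (init : List Int) :
    (PySem.List.sorted
        (([-1, 0, 1] : List Int).foldl (fun cand dx =>
          ([-1, 0, 1] : List Int).foldl (fun cand dy =>
            cand ++ ((PySem.List.pyRange 0 (locs.length : Int) 1).foldl (fun g i =>
          (g.setdefault (PySem.Int.floordiv (PySem.List.pyGetD locs i (0, 0)).1 s, PySem.Int.floordiv (PySem.List.pyGetD locs i (0, 0)).2 s) []).modify
            (PySem.Int.floordiv (PySem.List.pyGetD locs i (0, 0)).1 s, PySem.Int.floordiv (PySem.List.pyGetD locs i (0, 0)).2 s) [] (fun l => l ++ [i])) PySem.Dict.empty).getD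
              (PySem.Int.floordiv (PySem.List.pyGetD locs i (0, 0)).1 s + dx,
               PySem.Int.floordiv (PySem.List.pyGetD locs i (0, 0)).2 s + dy) []) cand) []) id).foldl
      (fun ai j =>
        if j ≠ i then
          if ((PySem.List.pyGetD locs j (0, 0)).1 - (PySem.List.pyGetD locs i (0, 0)).1) ^ 2
              + ((PySem.List.pyGetD locs j (0, 0)).2 - (PySem.List.pyGetD locs i (0, 0)).2) ^ 2 < radius
          then ai ++ [j] else ai
        else ai) init
      = init ++ adjSpec locs radius i := by
  simp only [List.foldl_cons, List.foldl_nil, List.nil_append, grid_getD, List.append_assoc]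
  have hcellsnodup : ([(PySem.Int.floordiv (PySem.List.pyGetD locs i (0, 0)).1 s + -1, PySem.Int.floordiv (PySem.List.pyGetD locs i (0, 0)).2 s + -1), (PySem.Int.floordiv (PySem.List.pyGetD locs i (0, 0)).1 s + -1, PySem.Int.floordiv (PySem.List.pyGetD locs i (0, 0)).2 s + 0), (PySem.Int.floordiv (PySem.List.pyGetD locs i (0, 0)).1 s + -1, PySem.Int.floordiv (PySem.List.pyGetD locs i (0, 0)).2 s + 1), (PySem.Int.floordiv (PySem.List.pyGetD locs i (0, 0)).1 s + 0, PySem.Int.floordiv (PySem.List.pyGetD locs i (0, 0)).2 s + -1), (PySem.Int.floordiv (PySem.List.pyGetD locs i (0, 0)).1 s + 0, PySem.Int.floordiv (PySem.List.pyGetD locs i (0, 0)).2 s + 0), (PySem.Int.floordiv (PySem.List.pyGetD locs i (0, 0)).1 s + 0, PySem.Int.floordiv (PySem.List.pyGetD locs i (0, 0)).2 s + 1), (PySem.Int.floordiv (PySem.List.pyGetD locs i (0, 0)).1 s + 1, PySem.Int.floordiv (PySem.List.pyGetD locs i (0, 0)).2 s + -1), (PySem.Int.floordiv (PySem.List.pyGetD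 locs i (0, 0)).1 s + 1, PySem.Int.floordiv (PySem.List.pyGetD locs i (0, 0)).2 s + 0), (PySem.Int.floordiv (PySem.List.pyGetD locs i (0, 0)).1 s + 1, PySem.Int.floordiv (PySem.List.pyGetD locs i (0, 0)).2 s + 1)] : List (Int × Int)).Nodup := by
    simp [List.nodup_cons, List.mem_cons, Prod.mk.injEq]
  have hperm := flatMap_filter_perm (PySem.List.pyRange 0 (locs.length : Int) 1)
    (fun j => ((PySem.Int.floordiv (PySem.List.pyGetD locs j (0, 0)).1 s, PySem.Int.floordiv (PySem.List.pyGetD locs j (0, 0)).2 s) : Int × Int)) [(PySem.Int.floordiv (PySem.List.pyGetD locs i (0, 0)).1 s + -1, PySem.Int.floordiv (PySem.List.pyGetD locs i (0, 0)).2 s + -1), (PySem.Int.floordiv (PySem.List.pyGetD locs i (0, 0)).1 s + -1, PySem.Int.floordiv (PySem.List.pyGetD locs i (0, 0)).2 s + 0), (PySem.Int.floordiv (PySem.List.pyGetD locs i (0, 0)).1 s + -1, PySem.Int.floordiv (PySem.List.pyGetD locs i (0, 0)).2 s + 1), (PySem.Int.floordiv (PySem.List.pyGetD locs i (0, 0)).1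 s + 0, PySem.Int.floordiv (PySem.List.pyGetD locs i (0, 0)).2 s + -1), (PySem.Int.floordiv (PySem.List.pyGetD locs i (0, 0)).1 s + 0, PySem.Int.floordiv (PySem.List.pyGetD locs i (0, 0)).2 s + 0), (PySem.Int.floordiv (PySem.List.pyGetD locs i (0, 0)).1 s + 0, PySem.Int.floordiv (PySem.List.pyGetD locs i (0, 0)).2 s + 1), (PySem.Int.floordiv (PySem.List.pyGetD locs i (0, 0)).1 s + 1, PySem.Int.floordiv (PySem.List.pyGetD locs i (0, 0)).2 s + -1), (PySem.Int.floordiv (PySem.List.pyGetD locs i (0, 0)).1 s + 1, PySem.Int.floordiv (PySem.List.pyGetD locs i (0, 0)).2 s + 0), (PySem.Int.floordiv (PySem.List.pyGetD locs i (0, 0)).1 s + 1, PySem.Int.floordiv (PySem.List.pyGetD locs i (0, 0)).2 s + 1)] hcellsnodup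
  simp only [List.flatMap_cons, List.flatMap_nil, List.append_nil] at hperm
  have hpair : List.Pairwise (fun a b => id a < id b)
      ((PySem.List.pyRange 0 (locs.length : Int) 1).filter
        (fun j => decide ((fun j => ((PySem.Int.floordiv (PySem.List.pyGetD locs j (0, 0)).1 s, PySem.Int.floordiv (PySem.List.pyGetD locs j (0, 0)).2 s) : Int × Int)) j ∈ [(PySem.Int.floordiv (PySem.List.pyGetD locs i (0, 0)).1 s + -1, PySem.Int.floordiv (PySem.List.pyGetD locs i (0, 0)).2 s + -1), (PySem.Int.floordiv (PySem.List.pyGetD locs i (0, 0)).1 s + -1, PySem.Int.floordiv (PySem.List.pyGetD locs i (0, 0)).2 s + 0), (PySem.Int.floordiv (PySem.List.pyGetD locs i (0, 0)).1 s + -1, PySem.Int.floordiv (PySem.List.pyGetD locs i (0, 0)).2 s + 1), (PySem.Int.floordiv (PySem.List.pyGetD locs i (0, 0)).1 s + 0, PySem.Int.floordiv (PySem.List.pyGetD locs i (0, 0)).2 s + -1), (PySem.Int.floordiv (PySem.List.pyGetD locs i (0, 0)).1 s + 0, PySem.Int.floordiv (PySem.List.pyGetD locs i (0, 0)).2 s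 + 0), (PySem.Int.floordiv (PySem.List.pyGetD locs i (0, 0)).1 s + 0, PySem.Int.floordiv (PySem.List.pyGetD locs i (0, 0)).2 s + 1), (PySem.Int.floordiv (PySem.List.pyGetD locs i (0, 0)).1 s + 1, PySem.Int.floordiv (PySem.List.pyGetD locs i (0, 0)).2 s + -1), (PySem.Int.floordiv (PySem.List.pyGetD locs i (0, 0)).1 s + 1, PySem.Int.floordiv (PySem.List.pyGetD locs i (0, 0)).2 s + 0), (PySem.Int.floordiv (PySem.List.pyGetD locs i (0, 0)).1 s + 1, PySem.Int.floordiv (PySem.List.pyGetD locs i (0, 0)).2 s + 1)]))) := by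
    simpa using (PySem.List.pairwise_lt_pyRange_one 0 (locs.length : Int)).filter _
  rw [PySem.List.sorted_eq_of_perm_of_pairwise_lt _ _ id hperm.symm hpair]
  have hbody : ∀ (acc : List Int), ∀ j ∈ (PySem.List.pyRange 0 (locs.length : Int) 1).filter
      (fun j => decide ((fun j => ((PySem.Int.floordiv (PySem.List.pyGetD locs j (0, 0)).1 s, PySem.Int.floordiv (PySem.List.pyGetD locs j (0, 0)).2 s) : Int × Int)) j ∈ [(PySem.Int.floordiv (PySem.List.pyGetD locs i (0, 0)).1 s + -1, PySem.Int.floordiv (PySem.List.pyGetD locs i (0, 0)).2 s + -1), (PySem.Int.floordiv (PySem.List.pyGetD locs i (0, 0)).1 s + -1, PySem.Int.floordiv (PySem.List.pyGetD locs i (0, 0)).2 s + 0), (PySem.Int.floordiv (PySem.List.pyGetD locs i (0, 0)).1 s + -1, PySem.Int.floordiv (PySem.List.pyGetD locs i (0, 0)).2 s + 1), (PySem.Int.floordiv (PySem.List.pyGetD locs i (0, 0)).1 s + 0, PySem.Int.floordiv (PySem.List.pyGetD locs i (0, 0)).2 s + -1), (PySem.Int.floordiv (PySem.List.pyGetD locs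 i (0, 0)).1 s + 0, PySem.Int.floordiv (PySem.List.pyGetD locs i (0, 0)).2 s + 0), (PySem.Int.floordiv (PySem.List.pyGetD locs i (0, 0)).1 s + 0, PySem.Int.floordiv (PySem.List.pyGetD locs i (0, 0)).2 s + 1), (PySem.Int.floordiv (PySem.List.pyGetD locs i (0, 0)).1 s + 1, PySem.Int.floordiv (PySem.List.pyGetD locs i (0, 0)).2 s + -1), (PySem.Int.floordiv (PySem.List.pyGetD locs i (0, 0)).1 s + 1, PySem.Int.floordiv (PySem.List.pyGetD locs i (0, 0)).2 s + 0), (PySem.Int.floordiv (PySem.List.pyGetD locs i (0, 0)).1 s + 1, PySem.Int.floordiv (PySem.List.pyGetD locs i (0, 0)).2 s + 1)])),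
      (fun (ai : List Int) j =>
        if j ≠ i then
          if ((PySem.List.pyGetD locs j (0, 0)).1 - (PySem.List.pyGetD locs i (0, 0)).1) ^ 2 +
              ((PySem.List.pyGetD locs j (0, 0)).2 - (PySem.List.pyGetD locs i (0, 0)).2) ^ 2 < radius then
            ai ++ [j]
          else ai
        else ai) acc j
      = (fun (ai : List Int) j => if pvPred locs radius i j then ai ++ [j] else ai) acc j := by
    intro acc j _
    by_cases hji : j ≠ i
    · by_cases hd : ((PySem.List.pyGetD locs j (0, 0)).1 - (PySem.List.pyGetD locs i (0, 0)).1) ^ 2 +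
          ((PySem.List.pyGetD locs j (0, 0)).2 - (PySem.List.pyGetD locs i (0, 0)).2) ^ 2 < radius
      · simp [pvPred, hji, location_distance, hd]
      · simp [pvPred, hji, location_distance, hd]
    · simp [pvPred, hji]
  rw [PySem.List.foldl_congr_mem _ _ _ _ hbody, PySem.List.foldl_append_if_eq_filter,
      List.filter_filter]
  apply congrArg
  unfold adjSpec
  apply List.filter_congr
  intro j hj
  cases hp : pvPred locs radius i j with
  | false => simp
  | true =>
    simp only [Bool.true_and]
    have hp' := hp
    simp only [pvPred, Bool.and_eq_true, decide_eq_true_eq] at hp'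
    obtain ⟨hji, hdist⟩ := hp'
    unfold location_distance at hdist
    obtain ⟨b1, b2, b3, b4⟩ := sq_lt_of_sum_sq_lt _ _ _ _ hdist hrs hs
    obtain ⟨hx1, hx2⟩ := floordiv_near s (PySem.List.pyGetD locs i (0, 0)).1
      (PySem.List.pyGetD locs j (0, 0)).1 hs (by omega) (by omega)
    obtain ⟨hy1, hy2⟩ := floordiv_near s (PySem.List.pyGetD locs i (0, 0)).2
      (PySem.List.pyGetD locs j (0, 0)).2 hs (by omega) (by omega)
    have hxcase : PySem.Int.floordiv (PySem.List.pyGetD locs j (0, 0)).1 s = PySem.Int.floordiv (PySem.List.pyGetD locs i (0, 0)).1 s + -1 ∨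
        PySem.Int.floordiv (PySem.List.pyGetD locs j (0, 0)).1 s = PySem.Int.floordiv (PySem.List.pyGetD locs i (0, 0)).1 s + 0 ∨
        PySem.Int.floordiv (PySem.List.pyGetD locs j (0, 0)).1 s = PySem.Int.floordiv (PySem.List.pyGetD locs i (0, 0)).1 s + 1 := by omega
    have hycase : PySem.Int.floordiv (PySem.List.pyGetD locs j (0, 0)).2 s = PySem.Int.floordiv (PySem.List.pyGetD locs i (0, 0)).2 s + -1 ∨
        PySem.Int.floordiv (PySem.List.pyGetD locs j (0, 0)).2 s = PySem.Int.floordiv (PySem.List.pyGetD locs i (0, 0)).2 s + 0 ∨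
        PySem.Int.floordiv (PySem.List.pyGetD locs j (0, 0)).2 s = PySem.Int.floordiv (PySem.List.pyGetD locs i (0, 0)).2 s + 1 := by omega
    simp only [decide_eq_true_eq]
    rcases hxcase with h | h | h <;> rcases hycase with h2 | h2 | h2 <;> rw [h, h2] <;>
      simp [List.mem_cons]

-- ---------- B: adjacency result ----------

lemma adjSpec_empty_of_nonpos (locs : List (Int × Int)) (radius i : Int) (hr : radius ≤ 0) :
    adjSpec locs radius i = [] := by
  unfold adjSpec
  rw [List.filter_eq_nil_iff]
  intro j _
  have hd : 0 ≤ location_distance (PySem.List.pyGetD locs i (0, 0)) (PySem.List.pyGetD locs j (0, 0)) := by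
    unfold location_distance
    positivity
  simp [pvPred]
  intro _
  omega


lemma setfold_char (locs : List (Int × Int)) (F : List (List Int) → Int → List (List Int))
    (A : Int → List Int)
    (hF : ∀ adj (i : Int), F adj i = PySem.List.pySetD adj i (PySem.List.pyGetD adj i [] ++ A i)) :
    ∀ (m : Nat), m ≤ locs.length →
      ((PySem.List.pyRange 0 (m : Int) 1).foldl F
          ((PySem.List.pyRange 0 (locs.length : Int) 1).map (fun _ => ([] : List Int)))).length = locs.length
      ∧ ∀ k : Int, 0 ≤ k → k < (locs.length : Int) →
          PySem.List.pyGetD ((PySem.List.pyRange 0 (m : Int) 1).foldl F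
            ((PySem.List.pyRange 0 (locs.length : Int) 1).map (fun _ => ([] : List Int)))) k []
          = if k < (m : Int) then A k else [] := by
  intro m
  induction m with
  | zero =>
    intro _
    rw [show ((0 : Nat) : Int) = 0 from rfl, PySem.List.pyRange_one_eq_nil (le_refl 0)]
    simp only [List.foldl_nil]
    constructor
    · simp [PySem.List.length_pyRange_one]
    · intro k hk0 hkn
      rw [PySem.List.pyGetD_map_pyRange_of_nonneg _ _ _ _ hk0 hkn]
      rw [if_neg (by omega)]
  | succ m ih =>
    intro hm
    obtain ⟨ihl, ihg⟩ := ih (by omega)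
    have hrange : PySem.List.pyRange 0 ((m + 1 : Nat) : Int) 1
        = PySem.List.pyRange 0 (m : Int) 1 ++ [(m : Int)] := by
      push_cast
      exact PySem.List.pyRange_one_succ_right (a := 0) (b := (m : Int)) (Int.natCast_nonneg m)
    rw [hrange, List.foldl_append, List.foldl_cons, List.foldl_nil, hF]
    have hprevm : PySem.List.pyGetD ((PySem.List.pyRange 0 (m : Int) 1).foldl F
        ((PySem.List.pyRange 0 (locs.length : Int) 1).map (fun _ => ([] : List Int)))) (m : Int) []
        = [] := by
      rw [ihg (m : Int) (Int.natCast_nonneg m) (by exact_mod_cast (by omega : m < locs.length))]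
      rw [if_neg (by omega)]
    rw [hprevm, List.nil_append]
    constructor
    · rw [PySem.List.length_pySetD]
      exact ihl
    · intro k hk0 hkn
      have hm2 : ((m : Nat) : Int) = ((m : Nat) : Int) := rfl
      have hk2 : ((k.toNat : Nat) : Int) = k := by omega
      rw [← hk2, PySem.List.pyGetD_pySetD_natCast _ m k.toNat _ _ (by rw [ihl]; omega)]
      by_cases hkm : k.toNat = m
      · rw [if_pos hkm, if_pos (by push_cast; omega)]
        exact congrArg A (by omega)
      · rw [if_neg hkm, hk2, ihg k hk0 hkn]
        by_cases hlt : k < (m : Int)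
        · rw [if_pos hlt, if_pos (by push_cast; omega)]
        · rw [if_neg hlt, if_neg (by push_cast; omega)]

set_option maxHeartbeats 1000000 in
lemma stepB_hF (locs : List (Int × Int)) (radius : Int)
    (hs : 1 ≤ pvCellLoop radius 1 radius.toNat)
    (hrs : radius ≤ pvCellLoop radius 1 radius.toNat * pvCellLoop radius 1 radius.toNat) :
    ∀ (adj : List (List Int)) (i : Int),
      ((fun adj i =>
          PySem.List.pySetD adj i
            ((PySem.List.sorted
                (([-1, 0, 1] : List Int).foldl (fun cand dx =>
                  ([-1, 0, 1] : List Int).foldl (fun cand dy =>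
                    cand ++ ((PySem.List.pyRange 0 (locs.length : Int) 1).foldl (fun g i =>
          (g.setdefault (PySem.Int.floordiv (PySem.List.pyGetD locs i (0, 0)).1 (pvCellLoop radius 1 radius.toNat), PySem.Int.floordiv (PySem.List.pyGetD locs i (0, 0)).2 (pvCellLoop radius 1 radius.toNat)) []).modify
            (PySem.Int.floordiv (PySem.List.pyGetD locs i (0, 0)).1 (pvCellLoop radius 1 radius.toNat), PySem.Int.floordiv (PySem.List.pyGetD locs i (0, 0)).2 (pvCellLoop radius 1 radius.toNat)) [] (fun l => l ++ [i])) PySem.Dict.empty).getD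
                      (PySem.Int.floordiv (PySem.List.pyGetD locs i (0, 0)).1 (pvCellLoop radius 1 radius.toNat) + dx,
                       PySem.Int.floordiv (PySem.List.pyGetD locs i (0, 0)).2 (pvCellLoop radius 1 radius.toNat) + dy) []) cand) [])
                id).foldl
              (fun ai j =>
                if j ≠ i then
                  if ((PySem.List.pyGetD locs j (0, 0)).1 - (PySem.List.pyGetD locs i (0, 0)).1) ^ 2
                      + ((PySem.List.pyGetD locs j (0, 0)).2 - (PySem.List.pyGetD locs i (0, 0)).2) ^ 2 < radius
                  then ai ++ [j] else ai
                else ai)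
              (PySem.List.pyGetD adj i [])))) adj i
      = PySem.List.pySetD adj i (PySem.List.pyGetD adj i [] ++ adjSpec locs radius i) :=
  fun adj i => congrArg (PySem.List.pySetD adj i)
    (ai_char locs radius i (pvCellLoop radius 1 radius.toNat) hs hrs (PySem.List.pyGetD adj i []))

set_option maxHeartbeats 1000000 in
lemma adjB_char (locs : List (Int × Int)) (radius : Int) :
    ∀ k, 0 ≤ k → k < (locs.length : Int) →
      PySem.List.pyGetD
        (if 0 < radius then
          let s := pvCellLoop radius 1 radius.toNat
          let grid : PySem.Dict (Int × Int) (List Int) :=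
            (PySem.List.pyRange 0 (PySem.List.len locs) 1).foldl (fun g i =>
          (g.setdefault (PySem.Int.floordiv (PySem.List.pyGetD locs i (0, 0)).1 s, PySem.Int.floordiv (PySem.List.pyGetD locs i (0, 0)).2 s) []).modify
            (PySem.Int.floordiv (PySem.List.pyGetD locs i (0, 0)).1 s, PySem.Int.floordiv (PySem.List.pyGetD locs i (0, 0)).2 s) [] (fun l => l ++ [i])) PySem.Dict.empty
          (PySem.List.pyRange 0 (PySem.List.len locs) 1).foldl
            (fun adj i =>
            PySem.List.pySetD adj i
              ((PySem.List.sorted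
                  (([-1, 0, 1] : List Int).foldl (fun cand dx =>
                    ([-1, 0, 1] : List Int).foldl (fun cand dy =>
                      cand ++ (grid).getD
                        (PySem.Int.floordiv (PySem.List.pyGetD locs i (0, 0)).1 s + dx,
                         PySem.Int.floordiv (PySem.List.pyGetD locs i (0, 0)).2 s + dy) []) cand) [])
                  id).foldl
                (fun ai j =>
                  if j ≠ i then
                    if ((PySem.List.pyGetD locs j (0, 0)).1 - (PySem.List.pyGetD locs i (0, 0)).1) ^ 2
                        + ((PySem.List.pyGetD locs j (0, 0)).2 - (PySem.List.pyGetD locs i (0, 0)).2) ^ 2 < radius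
                    then ai ++ [j] else ai
                  else ai)
                (PySem.List.pyGetD adj i [])))
            ((PySem.List.pyRange 0 (PySem.List.len locs) 1).map (fun _ => ([] : List Int)))
        else (PySem.List.pyRange 0 (PySem.List.len locs) 1).map (fun _ => ([] : List Int)))
        k []
      = adjSpec locs radius k := by
  intro k hk0 hkn
  simp only [PySem.List.len_eq]
  by_cases hr : 0 < radius
  · rw [if_pos hr]
    obtain ⟨hs, hrs⟩ := pvCellLoop_spec radius radius.toNat 1 (le_refl 1) (by omega)
    have h := (setfold_char locs _
        (adjSpec locs radius)
        (stepB_hF locs radius hs hrs)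
        locs.length (le_refl _)).2 k hk0 hkn
    rw [if_pos hkn] at h
    exact h
  · rw [if_neg hr]
    rw [PySem.List.pyGetD_map_pyRange_of_nonneg _ _ _ _ hk0 hkn]
    rw [adjSpec_empty_of_nonpos locs radius k (by omega)]

lemma pruneitems_gen (locs : List (Int × Int)) (radius : Int) (ADJ : List (List Int))
    (hadj : ∀ k, 0 ≤ k → k < (locs.length : Int) →
      PySem.List.pyGetD ADJ k [] = adjSpec locs radius k) :
    ((((PySem.List.pyRange 0 (locs.length : Int) 1).filter (fun i => PySem.List.pyGetD
        ((PySem.List.pyRange 0 (locs.length : Int) 1).foldl (fun alive u =>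
          if PySem.List.pyGetD alive u false then
            (PySem.List.pyGetD ADJ u []).foldl (fun alive v =>
              if PySem.List.pyGetD alive v false
                 && decide ((PySem.List.pyGetD ADJ v []).length ≤ (PySem.List.pyGetD ADJ u []).length) then
                PySem.List.pySetD alive v false
              else alive) alive
          else alive) ((PySem.List.pyRange 0 (locs.length : Int) 1).map (fun _ => true))) i false)).foldl
      (fun d i => d.insert i (PySem.List.pyGetD ADJ i [])) PySem.Dict.empty).items)
    = (repD locs radius (pruneB locs radius)).items := by
  have hACongr : ∀ (al : List Bool), ∀ u ∈ (PySem.List.pyRange 0 (locs.length : Int) 1),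
      (fun (alive : List Bool) (u : Int) =>
        if PySem.List.pyGetD alive u false then
          (PySem.List.pyGetD ADJ u []).foldl (fun alive v =>
            if PySem.List.pyGetD alive v false
               && decide ((PySem.List.pyGetD ADJ v []).length ≤ (PySem.List.pyGetD ADJ u []).length) then
              PySem.List.pySetD alive v false
            else alive) alive
        else alive) al u = pruneStepB locs radius al u := by
    intro al u hu
    obtain ⟨h0u, hun⟩ := PySem.List.mem_pyRange_one.mp hu
    simp only []
    unfold pruneStepB aliveF
    rw [hadj u h0u hun]
    by_cases hg : PySem.List.pyGetD al u false = true
    · rw [if_pos hg, if_pos hg]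
      apply PySem.List.foldl_congr_mem
      intro acc v hv
      obtain ⟨h0v, hvn⟩ := adjSpec_mem locs radius u v hv
      rw [hadj v h0v hvn]
    · rw [if_neg hg, if_neg hg]
  have hAlive : (PySem.List.pyRange 0 (locs.length : Int) 1).foldl (fun alive u =>
        if PySem.List.pyGetD alive u false then
          (PySem.List.pyGetD ADJ u []).foldl (fun alive v =>
            if PySem.List.pyGetD alive v false
               && decide ((PySem.List.pyGetD ADJ v []).length ≤ (PySem.List.pyGetD ADJ u []).length) then
              PySem.List.pySetD alive v false
            else alive) alive
        else alive) ((PySem.List.pyRange 0 (locs.length : Int) 1).map (fun _ => true))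
      = pruneB locs radius := by
    unfold pruneB aliveInit
    exact PySem.List.foldl_congr_mem _ _ _ _ hACongr
  rw [hAlive]
  rw [PySem.Dict.items_foldl_insert_fresh (k := fun i => i)
        (v := fun i => PySem.List.pyGetD ADJ i [])]
  · unfold repD aliveF
    simp only [PySem.Dict.empty, List.nil_append]
    apply List.map_congr_left
    intro i hi
    have hmem := List.mem_of_mem_filter hi
    obtain ⟨h0i, hin⟩ := PySem.List.mem_pyRange_one.mp hmem
    rw [hadj i h0i hin]
  · intro a _
    simp [PySem.Dict.contains_empty]
  · simp only [List.map_id']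
    exact (PySem.List.nodup_pyRange_one 0 _).filter _

lemma mainB (locs : List (Int × Int)) (radius : Int) :
    find_centroids_alt locs radius = (repD locs radius (pruneB locs radius)).items := by
  simp only [find_centroids_alt, PySem.List.len_eq]
  refine pruneitems_gen locs radius _ ?_
  intro k h1 h2
  exact adjB_char locs radius k h1 h2

-- ===== VERDICT (by name: the statement is the Claim_ definition above) =====
theorem find_centroids_spec : Claim_equal_find_centroids := by
  intro locs radius _
  unfold Spec_find_centroids
  rw [mainA, mainB]
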